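-- pv_equiv track=rewrite | github.com/kawamataryo/leetcode | solutions/2108.find-first-palindromic-string-in-the-array.py | firstPalindrome
-- ===== SOURCE A (Python) =====
-- from typing import List
--
-- def firstPalindrome(words: List[str]) -> str:
--     def is_palindromic(word: str):
--         i = 0
--         while i < len(word) // 2:
--             if word[i] != word[-(i+1)]:
--                 return False
--             i += 1
--         return True
--
--     for word in words:
--         if is_palindromic(word):
--             return word
--
--     return ""
-- ===== SOURCE B (Python) =====
-- from typing import List
--
-- def firstPalindrome(words: List[str]) -> str:
--     return next((w for w in words if w == w[::-1]), "")
-- ===== Notes on version B (the rewrite author's own statement) =====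
-- stated objective: idiomatic
-- what changed: Replaces the index-maintaining two-pointer palindrome loop with a reversed-copy equality test and the explicit for/return/fallback scan with a lazy next(...) over a generator with default "".
import Mathlib
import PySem

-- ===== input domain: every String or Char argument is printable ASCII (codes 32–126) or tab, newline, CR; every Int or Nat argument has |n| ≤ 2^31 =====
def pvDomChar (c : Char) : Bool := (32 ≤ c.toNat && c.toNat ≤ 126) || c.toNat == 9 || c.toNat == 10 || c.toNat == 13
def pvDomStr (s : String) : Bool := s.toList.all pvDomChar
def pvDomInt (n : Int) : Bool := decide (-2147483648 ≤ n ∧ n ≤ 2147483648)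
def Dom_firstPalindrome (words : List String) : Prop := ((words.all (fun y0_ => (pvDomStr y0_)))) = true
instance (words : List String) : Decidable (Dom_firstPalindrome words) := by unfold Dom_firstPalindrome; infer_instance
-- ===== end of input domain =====

-- B replaces A's two-pointer palindrome loop by a reversed-copy equality test and
-- A's explicit scan by a first-match search with default "" (idiomatic, same cost).

-- ===== PORT A =====
-- the inner 'while i < len(word) // 2' loop of is_palindromic
def pvIsPalLoop (cs : List Char) (i : Nat) : Bool :=
  if _h : i < cs.length / 2 then
    if PySem.List.pyGet? cs (i : Int) ≠ PySem.List.pyGet? cs (-((i : Int) + 1)) then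
      false
    else
      pvIsPalLoop cs (i + 1)
  else
    true
termination_by cs.length / 2 - i

def firstPalindrome (words : List String) : String :=
  match words with
  | [] => ""
  | w :: rest => if pvIsPalLoop w.toList 0 then w else firstPalindrome rest

-- ===== PORT B =====
-- 'w == w[::-1]' : the slice w[::-1] is the reversed string (PySem.Str.slice?_none_none_neg_one)
def pvIsPalB (w : String) : Bool := w == String.ofList w.toList.reverse

-- next((w for w in words if w == w[::-1]), "")
def firstPalindrome_alt (words : List String) : String :=
  (words.find? pvIsPalB).getD ""

-- ===== PRECONDITION & SPEC =====
def Spec_firstPalindrome (words : List String) (out : String) : Prop := out = firstPalindrome_alt words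
instance (words : List String) (out : String) : Decidable (Spec_firstPalindrome words out) := by unfold Spec_firstPalindrome; infer_instance

-- ===== CLAIM (what is proved, stated in full; the proofs are below) =====
def Claim_equal_firstPalindrome : Prop := ∀ (words : List String), Dom_firstPalindrome words → Spec_firstPalindrome words (firstPalindrome words)

-- ===== LEMMAS AND PROOFS =====

theorem pvGets (cs : List Char) (i : Nat) (h : i < cs.length / 2) :
    PySem.List.pyGet? cs (i : Int) = some (cs[i]'(by omega)) ∧
    PySem.List.pyGet? cs (-((i : Int) + 1)) = some (cs[cs.length - 1 - i]'(by omega)) := by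
  constructor
  · rw [PySem.List.pyGet?_natCast, List.getElem?_eq_getElem (by omega)]
  · have := PySem.List.pyGet?_neg_natCast (xs := cs) (k := i + 1) (by omega) (by omega)
    rw [show -((i : Int) + 1) = -((i + 1 : Nat) : Int) by push_cast; ring, this,
      show cs.length - (i + 1) = cs.length - 1 - i by omega,
      List.getElem?_eq_getElem (by omega)]

-- A's loop from index i checks cs[j] = cs[len-1-j] for all i <= j < len/2
theorem pvIsPalLoop_iff (cs : List Char) (i : Nat) :
    pvIsPalLoop cs i = true ↔
      ∀ j, i ≤ j → (h : j < cs.length / 2) →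
        cs[j]'(by omega) = cs[cs.length - 1 - j]'(by omega) := by
  induction i using (pvIsPalLoop.induct cs) with
  | case1 i h hne =>
    obtain ⟨h1, h2⟩ := pvGets cs i h
    rw [pvIsPalLoop, dif_pos h, if_pos hne]
    rw [h1, h2] at hne
    refine iff_of_false (by simp) ?_
    intro hall
    exact hne (by rw [hall i le_rfl h])
  | case2 i h hne ih =>
    obtain ⟨h1, h2⟩ := pvGets cs i h
    rw [h1, h2] at hne
    have heq : cs[i]'(by omega) = cs[cs.length - 1 - i]'(by omega) := by simpa using hne
    rw [pvIsPalLoop, dif_pos h, if_neg (by rw [h1, h2]; simpa using hne), ih]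
    constructor
    · intro hrest j hij hj
      rcases Nat.eq_or_lt_of_le hij with rfl | hlt
      · exact heq
      · exact hrest j hlt hj
    · intro hall j hij hj; exact hall j (by omega) hj
  | case3 i h =>
    rw [pvIsPalLoop, dif_neg h]
    simp only [true_iff]
    intro j hij hj
    omega

-- half-check <-> full palindrome
theorem pvIsPalLoop_zero_iff (cs : List Char) :
    pvIsPalLoop cs 0 = true ↔ cs.reverse = cs := by
  rw [pvIsPalLoop_iff]
  constructor
  · intro hall
    apply List.ext_getElem (by simp)
    intro j hj hj'
    rw [List.getElem_reverse]
    have key : ∀ k, (hk : k < cs.length / 2) →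
        cs[k]'(by omega) = cs[cs.length - 1 - k]'(by omega) := fun k hk => hall k (Nat.zero_le _) hk
    rcases Nat.lt_or_ge j (cs.length / 2) with hlt | hge
    · exact (key j hlt).symm
    · rcases Nat.lt_or_ge (cs.length - 1 - j) (cs.length / 2) with hlt2 | hge2
      · have := key (cs.length - 1 - j) hlt2
        simp only [show cs.length - 1 - (cs.length - 1 - j) = j from by omega] at this
        exact this
      · have hjj : cs.length - 1 - j = j := by omega
        simp only [hjj]
  · intro hrev j _ hj
    have hj' : j < cs.length := by omega
    have := List.getElem_reverse (l := cs) (i := j) (by simpa using hj')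
    simp only [hrev] at this
    exact this

theorem pvIsPalLoop_eq_pvIsPalB (w : String) : pvIsPalLoop w.toList 0 = pvIsPalB w := by
  have hb : pvIsPalB w = true ↔ w.toList.reverse = w.toList := by
    constructor
    · intro h
      simp only [pvIsPalB, beq_iff_eq] at h
      conv_rhs => rw [h]
      rw [String.toList_ofList]
    · intro h
      simp [pvIsPalB, String.ofList, h]
  rw [Bool.eq_iff_iff, pvIsPalLoop_zero_iff, hb]

theorem pvFirstPalindrome_eq (words : List String) :
    firstPalindrome words = firstPalindrome_alt words := by
  unfold firstPalindrome_alt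
  induction words with
  | nil => rfl
  | cons w rest ih =>
    rw [firstPalindrome, List.find?, pvIsPalLoop_eq_pvIsPalB w]
    cases hb : pvIsPalB w with
    | true => simp
    | false => simpa using ih

-- ===== VERDICT (by name: the statement is the Claim_ definition above) =====
theorem firstPalindrome_spec : Claim_equal_firstPalindrome := by
  intro words _
  exact pvFirstPalindrome_eq words
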